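-- pv_equiv track=rewrite | github.com/blake663/leetcode-solutions | 2351-NumberOfWaysToBuyPensAndPencils/2351-NumberOfWaysToBuyPensAndPencils.py | waysToBuyPensPencils
-- ===== SOURCE A (Python) =====
-- def waysToBuyPensPencils(total: int, cost1: int, cost2: int) -> int:
--     a = []
--     res = 0
--     for i in range(0, total+1):
--         x = i % cost1 == 0
--         if i - cost2 >= 0:
--             x += a[i-cost2]
--         a.append(x)
--         res += x
--     return res
-- ===== SOURCE B (Python) =====
-- def waysToBuyPensPencils(total: int, cost1: int, cost2: int) -> int:
--     # For k pens (k*cost1 <= total) the remaining budget allows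
--     # (total - k*cost1) // cost2 + 1 pencil counts (including zero).
--     return sum((total - k * cost1) // cost2 + 1 for k in range(total // cost1 + 1))
-- ===== Notes on version B (the rewrite author's own statement) =====
-- stated objective: faster
-- what changed: Replaces the O(total) dynamic-programming table a[i] by a closed-form sum over pen counts, sum_k floor((total-k*cost1)/cost2)+1, which is O(total/cost1) with O(1) memory; Pre_ keeps the natural domain of positive costs (it excludes cost1 <= 0, negative or zero pen cost, where A's value with total >= 0 is an artefact of Python's negative-divisor modulo or a ZeroDivisionError, and cost2 <= 0 with total >= 0 where A raises IndexError).
-- outside the precondition, e.g. on waysToBuyPensPencils(5, -2, 3): A returns 5, B returns 0; on waysToBuyPensPencils(-5, -1, 3): A returns 0, B returns -1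
import Mathlib
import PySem

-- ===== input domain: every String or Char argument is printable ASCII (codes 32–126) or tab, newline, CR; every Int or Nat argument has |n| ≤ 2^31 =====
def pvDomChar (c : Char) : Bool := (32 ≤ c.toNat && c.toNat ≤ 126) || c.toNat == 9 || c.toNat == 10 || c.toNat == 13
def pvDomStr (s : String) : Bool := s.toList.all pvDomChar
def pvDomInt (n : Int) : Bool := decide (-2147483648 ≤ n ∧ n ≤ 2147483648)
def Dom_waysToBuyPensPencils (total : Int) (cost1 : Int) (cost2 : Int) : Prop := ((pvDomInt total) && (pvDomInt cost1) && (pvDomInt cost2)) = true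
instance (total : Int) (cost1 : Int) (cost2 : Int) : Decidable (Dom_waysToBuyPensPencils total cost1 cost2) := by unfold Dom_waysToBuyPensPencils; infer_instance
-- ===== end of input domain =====

-- B replaces A's O(total) DP table by a closed-form sum over pen counts (O(total/cost1), O(1) memory).

-- ===== PORT A =====
-- one loop step of A: x = (i % cost1 == 0) (+ a[i-cost2] if in reach); a.append(x); res += x
def pvStepA (cost1 : Int) (cost2 : Int) (st : Array Int × Int) (i : Int) : Array Int × Int :=
  -- a[i-cost2]: the index is guarded nonnegative; exact wherever Python A returns (in range: Pre_)
  let x : Int := (if PySem.Int.mod i cost1 = 0 then 1 else 0) +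
                 (if 0 ≤ i - cost2 then st.1.getD (i - cost2).toNat 0 else 0)
  (st.1.push x, st.2 + x)

def waysToBuyPensPencils (total : Int) (cost1 : Int) (cost2 : Int) : Int :=
  ((PySem.List.pyRange 0 (total + 1) 1).foldl (pvStepA cost1 cost2) (#[], 0)).2

-- ===== PORT B =====
def waysToBuyPensPencils_alt (total : Int) (cost1 : Int) (cost2 : Int) : Int :=
  (PySem.List.pyRange 0 (PySem.Int.floordiv total cost1 + 1) 1).foldl
    (fun res k => res + (PySem.Int.floordiv (total - k * cost1) cost2 + 1)) 0

-- ===== PRECONDITION & SPEC =====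
-- Pre_ keeps the natural domain of a positive pen cost: it excludes cost1 ≤ 0 (negative or
-- zero cost, where A's value with total ≥ 0 is an artefact of Python's negative-divisor
-- modulo, or a ZeroDivisionError for cost1 = 0) and cost2 ≤ 0 with total ≥ 0 (where A
-- raises IndexError on a[i-cost2]).
def Pre_waysToBuyPensPencils (total : Int) (cost1 : Int) (cost2 : Int) : Prop :=
  0 < cost1 ∧ (total < 0 ∨ 0 < cost2)
instance (total : Int) (cost1 : Int) (cost2 : Int) : Decidable (Pre_waysToBuyPensPencils total cost1 cost2) := by unfold Pre_waysToBuyPensPencils; infer_instance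

def pvWitness_waysToBuyPensPencils : Int × Int × Int := (10, 2, 3)

def Spec_waysToBuyPensPencils (total : Int) (cost1 : Int) (cost2 : Int) (out : Int) : Prop := out = waysToBuyPensPencils_alt total cost1 cost2
instance (total : Int) (cost1 : Int) (cost2 : Int) (out : Int) : Decidable (Spec_waysToBuyPensPencils total cost1 cost2 out) := by unfold Spec_waysToBuyPensPencils; infer_instance

-- ===== CLAIM (what is proved, stated in full; the proofs are below) =====
def Claim_equal_waysToBuyPensPencils : Prop := ∀ (total : Int) (cost1 : Int) (cost2 : Int), Dom_waysToBuyPensPencils total cost1 cost2 → Pre_waysToBuyPensPencils total cost1 cost2 → Spec_waysToBuyPensPencils total cost1 cost2 (waysToBuyPensPencils total cost1 cost2)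

-- ===== LEMMAS AND PROOFS =====

-- the mathematical recurrence computed by A's table: g i = [c1 ∣ i] + g (i - c2)
def pvG (c1 c2 : Nat) (i : Nat) : Nat :=
  (if c1 ∣ i then 1 else 0) + (if _h : 0 < c2 ∧ c2 ≤ i then pvG c1 c2 (i - c2) else 0)
termination_by i
decreasing_by omega

def pvGSum (c1 c2 T : Nat) : Nat := ∑ i ∈ Finset.range (T + 1), pvG c1 c2 i

def pvHSum (c1 c2 T : Nat) : Nat := ∑ k ∈ Finset.range (T / c1 + 1), ((T - k * c1) / c2 + 1)

-- number of multiples of c1 in [0, T]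
lemma pvCountDvd (c1 : Nat) (T : Nat) :
    (∑ i ∈ Finset.range (T + 1), (if c1 ∣ i then 1 else 0)) = T / c1 + 1 := by
  induction T with
  | zero =>
      rw [Finset.sum_range_succ]
      simp
  | succ T ih =>
      rw [Finset.sum_range_succ, ih, Nat.succ_div]
      by_cases h : c1 ∣ T + 1 <;> simp [h]

lemma pvGSum_base (c1 c2 : Nat) (_hc1 : 0 < c1) (hT : T < c2) :
    pvGSum c1 c2 T = T / c1 + 1 := by
  unfold pvGSum
  rw [← pvCountDvd c1 T]
  apply Finset.sum_congr rfl
  intro i hi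
  rw [Finset.mem_range] at hi
  rw [pvG, dif_neg (by omega), Nat.add_zero]

lemma pvGSum_step (c1 c2 : Nat) (_hc1 : 0 < c1) (hc2 : 0 < c2) (hT : c2 ≤ T) :
    pvGSum c1 c2 T = T / c1 + 1 + pvGSum c1 c2 (T - c2) := by
  unfold pvGSum
  have hsplit : ∀ i, pvG c1 c2 i =
      (if c1 ∣ i then 1 else 0) + (if c2 ≤ i then pvG c1 c2 (i - c2) else 0) := by
    intro i
    rw [pvG]
    by_cases h : c2 ≤ i
    · rw [dif_pos ⟨hc2, h⟩, if_pos h]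
    · rw [dif_neg (by omega), if_neg h]
  calc ∑ i ∈ Finset.range (T + 1), pvG c1 c2 i
      = (∑ i ∈ Finset.range (T + 1), (if c1 ∣ i then 1 else 0))
        + ∑ i ∈ Finset.range (T + 1), (if c2 ≤ i then pvG c1 c2 (i - c2) else 0) := by
        rw [← Finset.sum_add_distrib]
        exact Finset.sum_congr rfl fun i _ => hsplit i
    _ = T / c1 + 1 + ∑ i ∈ Finset.range (T - c2 + 1), pvG c1 c2 i := by
        rw [pvCountDvd c1 T]
        congr 1
        rw [← Finset.sum_filter]
        have hf : (Finset.range (T + 1)).filter (fun i => c2 ≤ i) = Finset.Ico c2 (T + 1) := by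
          ext i; simp [Finset.mem_filter, Finset.mem_range, Finset.mem_Ico]; omega
        rw [hf, Finset.sum_Ico_eq_sum_range]
        have hn : T + 1 - c2 = T - c2 + 1 := by omega
        rw [hn]
        exact Finset.sum_congr rfl fun i _ => by congr 1; omega

lemma pvHSum_base (c1 c2 : Nat) (hT : T < c2) :
    pvHSum c1 c2 T = T / c1 + 1 := by
  unfold pvHSum
  have : ∀ k ∈ Finset.range (T / c1 + 1), (T - k * c1) / c2 + 1 = 1 := by
    intro k _
    rw [Nat.div_eq_of_lt (by omega)]
  rw [Finset.sum_congr rfl this, Finset.sum_const, Finset.card_range, smul_eq_mul, mul_one]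

lemma pvHSum_step (c1 c2 : Nat) (hc1 : 0 < c1) (hc2 : 0 < c2) (hT : c2 ≤ T) :
    pvHSum c1 c2 T = T / c1 + 1 + pvHSum c1 c2 (T - c2) := by
  unfold pvHSum
  have hmM : (T - c2) / c1 ≤ T / c1 := Nat.div_le_div_right (by omega)
  set m := (T - c2) / c1 with hm
  set M := T / c1 with hM
  -- split the k-range at m+1
  rw [Finset.range_eq_Ico,
    ← Finset.sum_Ico_consecutive (fun k => (T - k * c1) / c2 + 1)
      (Nat.zero_le (m + 1)) (by omega : m + 1 ≤ M + 1)]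
  have hlow : ∑ k ∈ Finset.Ico 0 (m + 1), ((T - k * c1) / c2 + 1)
      = (∑ k ∈ Finset.Ico 0 (m + 1), ((T - c2 - k * c1) / c2 + 1)) + (m + 1) := by
    have hterm : ∀ k ∈ Finset.Ico 0 (m + 1),
        (T - k * c1) / c2 + 1 = ((T - c2 - k * c1) / c2 + 1) + 1 := by
      intro k hk
      rw [Finset.mem_Ico] at hk
      have hkm : k * c1 ≤ T - c2 := le_trans
        (Nat.mul_le_mul_right c1 (by omega : k ≤ m)) (Nat.div_mul_le_self _ _)
      have hle : c2 ≤ T - k * c1 := by omega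
      have e1 : T - k * c1 - c2 = T - c2 - k * c1 := by omega
      rw [Nat.div_eq_sub_div hc2 hle, e1]
    rw [Finset.sum_congr rfl hterm, Finset.sum_add_distrib, Finset.sum_const,
      Nat.card_Ico, smul_eq_mul, mul_one, Nat.sub_zero]
  have hhigh : ∑ k ∈ Finset.Ico (m + 1) (M + 1), ((T - k * c1) / c2 + 1) = M - m := by
    have hterm : ∀ k ∈ Finset.Ico (m + 1) (M + 1), (T - k * c1) / c2 + 1 = 1 := by
      intro k hk
      rw [Finset.mem_Ico] at hk
      have h1 : T - c2 < (m + 1) * c1 :=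
        (Nat.div_lt_iff_lt_mul hc1).mp (by omega : (T - c2) / c1 < m + 1)
      have h2 : (m + 1) * c1 ≤ k * c1 := Nat.mul_le_mul_right c1 (by omega)
      rw [Nat.div_eq_of_lt (by omega)]
    rw [Finset.sum_congr rfl hterm, Finset.sum_const, Nat.card_Ico, smul_eq_mul, mul_one]
    omega
  rw [hlow, hhigh]
  omega

lemma pvGH (c1 c2 : Nat) (hc1 : 0 < c1) (hc2 : 0 < c2) :
    ∀ T, pvGSum c1 c2 T = pvHSum c1 c2 T := by
  intro T
  induction T using Nat.strong_induction_on with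
  | _ T ih =>
    by_cases hT : c2 ≤ T
    · rw [pvGSum_step c1 c2 hc1 hc2 hT, pvHSum_step c1 c2 hc1 hc2 hT,
        ih (T - c2) (by omega)]
    · rw [pvGSum_base c1 c2 hc1 (by omega), pvHSum_base c1 c2 (by omega)]

-- A's loop step at budget n, starting from the table of all smaller budgets
lemma pvA_step (cost1 cost2 : Int) (h2 : 0 < cost2) (n : Nat) :
    pvStepA cost1 cost2
        (((List.range n).map (fun i => (pvG cost1.natAbs cost2.toNat i : Int))).toArray,
          ((∑ i ∈ Finset.range n, pvG cost1.natAbs cost2.toNat i : Nat) : Int))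
        ((0 : Int) + n)
      = (((List.range (n + 1)).map (fun i => (pvG cost1.natAbs cost2.toNat i : Int))).toArray,
          ((∑ i ∈ Finset.range (n + 1), pvG cost1.natAbs cost2.toNat i : Nat) : Int)) := by
  set c1 := cost1.natAbs with hc1
  set c2 := cost2.toNat with hc2
  have hc2pos : 0 < c2 := by omega
  have hc2cast : cost2 = (c2 : Int) := by omega
  have hx : ((if PySem.Int.mod ((0 : Int) + n) cost1 = 0 then 1 else 0) +
      (if 0 ≤ ((0 : Int) + n) - cost2 then
        (((List.range n).map (fun i => (pvG c1 c2 i : Int))).toArray).getD ((((0 : Int) + n) - cost2)).toNat 0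
      else 0) : Int) = (pvG c1 c2 n : Int) := by
    have hdvd : (PySem.Int.mod ((0 : Int) + n) cost1 = 0) ↔ c1 ∣ n := by
      rw [PySem.Int.mod_eq_zero_iff_dvd]
      rw [zero_add, hc1]
      rw [← Int.natAbs_dvd]
      exact_mod_cast Iff.rfl
    simp only [hdvd]
    by_cases hcn : c2 ≤ n
    · have hidx : ((0 : Int) + n) - cost2 = ((n - c2 : Nat) : Int) := by omega
      rw [hidx, if_pos (show (0 : Int) ≤ ((n - c2 : Nat) : Int) by positivity),
        Int.toNat_natCast]
      have hget : (((List.range n).map (fun i => (pvG c1 c2 i : Int))).toArray).getD (n - c2) 0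
          = (pvG c1 c2 (n - c2) : Int) := by
        rw [Array.getD_eq_getD_getElem?, List.getElem?_toArray, List.getElem?_map,
          List.getElem?_range (by omega)]
        rfl
      rw [hget,
        show pvG c1 c2 n = (if c1 ∣ n then 1 else 0) + pvG c1 c2 (n - c2) by
          rw [pvG, dif_pos ⟨hc2pos, hcn⟩]]
      push_cast
      split_ifs <;> ring
    · rw [if_neg (show ¬ (0 : Int) ≤ ((0 : Int) + n) - cost2 by omega),
        show pvG c1 c2 n = (if c1 ∣ n then 1 else 0) + 0 by rw [pvG, dif_neg (by omega)]]
      push_cast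
      split_ifs <;> ring
  show pvStepA cost1 cost2 _ _ = _
  rw [pvStepA]
  refine Prod.ext ?_ ?_
  · show (((List.range n).map (fun i => (pvG c1 c2 i : Int))).toArray).push _ = _
    rw [hx, List.push_toArray, List.range_succ, List.map_append]
    rfl
  · show ((∑ i ∈ Finset.range n, pvG c1 c2 i : Nat) : Int) + _ = _
    rw [hx, Finset.sum_range_succ]
    push_cast
    ring

lemma pvA_inv (cost1 cost2 : Int) (h2 : 0 < cost2) (n : Nat) :
    ((List.range n).map (fun (k : Nat) => ((0 : Int) + (k : Int)))).foldl (pvStepA cost1 cost2) (#[], 0)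
      = (((List.range n).map (fun i => (pvG cost1.natAbs cost2.toNat i : Int))).toArray,
          ((∑ i ∈ Finset.range n, pvG cost1.natAbs cost2.toNat i : Nat) : Int)) := by
  induction n with
  | zero => simp
  | succ n ih =>
      rw [List.range_succ, List.map_append, List.foldl_append, ih]
      have h := pvA_step cost1 cost2 h2 n
      rw [List.range_succ, List.map_append] at h
      simpa using h

lemma pvA_bridge (total cost1 cost2 : Int) (h0 : 0 ≤ total) (_h1 : cost1 ≠ 0) (h2 : 0 < cost2) :
    waysToBuyPensPencils total cost1 cost2 =
      (pvGSum cost1.natAbs cost2.toNat total.toNat : Int) := by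
  unfold waysToBuyPensPencils
  rw [PySem.List.pyRange_one 0 (total + 1)]
  have hlen : (total + 1 - 0).toNat = total.toNat + 1 := by omega
  rw [hlen, pvA_inv cost1 cost2 h2 (total.toNat + 1)]
  rfl

-- folding '+ f k' over a list is the sum of f over it
lemma pvFoldlAdd (l : List Int) (f : Int → Int) (init : Int) :
    l.foldl (fun r k => r + f k) init = init + (l.map f).sum := by
  induction l generalizing init with
  | nil => simp
  | cons a l ih => simp [ih, add_assoc]

lemma pvSumMapRange (N : Nat) (f : Nat → Int) :
    ((List.range N).map f).sum = ∑ i ∈ Finset.range N, f i := by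
  induction N with
  | zero => simp
  | succ N ih => simp [List.range_succ, Finset.sum_range_succ, ih]

-- B's bridge
lemma pvB_bridge (total cost1 cost2 : Int) (h0 : 0 ≤ total) (h1 : 0 < cost1) (h2 : 0 < cost2) :
    waysToBuyPensPencils_alt total cost1 cost2 =
      (pvHSum cost1.natAbs cost2.toNat total.toNat : Int) := by
  set c1 := cost1.natAbs with hc1
  set c2 := cost2.toNat with hc2
  set T := total.toNat with hT
  have hc1pos : 0 < c1 := by omega
  have hcast : cost1 = (c1 : Int) := by omega
  have hc2cast : cost2 = (c2 : Int) := by omega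
  have htot : total = (T : Int) := by omega
  unfold waysToBuyPensPencils_alt
  rw [hcast, hc2cast, htot, PySem.Int.floordiv_natCast T c1]
  have hbound : (Nat.cast (T / c1) : Int) + 1 = (Nat.cast (T / c1 + 1) : Int) := by push_cast; ring
  rw [hbound, PySem.List.pyRange_one 0 _]
  have hlen : ((Nat.cast (T / c1 + 1) : Int) - 0).toNat = T / c1 + 1 := by
    rw [sub_zero]; exact Int.toNat_natCast _
  rw [hlen, pvFoldlAdd, zero_add, List.map_map, pvSumMapRange]
  unfold pvHSum
  rw [Nat.cast_sum]
  apply Finset.sum_congr rfl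
  intro k hk
  rw [Finset.mem_range] at hk
  have hkc1 : k * c1 ≤ T := (Nat.le_div_iff_mul_le hc1pos).mp (by omega)
  have hsub : (T : Int) - ((0 : Int) + (k : Int)) * (c1 : Int) = ((T - k * c1 : Nat) : Int) := by
    rw [Nat.cast_sub hkc1, Nat.cast_mul]; ring
  simp only [Function.comp_apply]
  rw [hsub, PySem.Int.floordiv_natCast]
  push_cast
  ring

-- ===== VERDICT (by name: the statement is the Claim_ definition above) =====
theorem waysToBuyPensPencils_spec : Claim_equal_waysToBuyPensPencils := by
  intro total cost1 cost2 _ hpre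
  unfold Spec_waysToBuyPensPencils
  rcases hpre with ⟨h1, hor⟩
  by_cases h0 : 0 ≤ total
  · have h2 : 0 < cost2 := by omega
    rw [pvA_bridge total cost1 cost2 h0 (by omega) h2, pvB_bridge total cost1 cost2 h0 h1 h2,
      pvGH cost1.natAbs cost2.toNat (by omega) (by omega) total.toNat]
  · have hdivneg : PySem.Int.floordiv total cost1 < 0 := by
      rw [PySem.Int.floordiv_eq_ediv_of_pos h1]
      exact Int.ediv_neg_of_neg_of_pos (by omega) h1
    unfold waysToBuyPensPencils waysToBuyPensPencils_alt
    rw [PySem.List.pyRange_one_eq_nil (a := 0) (b := total + 1) (by omega),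
      PySem.List.pyRange_one_eq_nil (a := 0) (by omega)]
    rfl
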